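-- pv_equiv track=rewrite | github.com/adnanyaqoobvirk/leetcode | 3637-trionic-array-i/3637-trionic-array-i.py | isTrionic
-- ===== SOURCE A (Python) =====
-- from typing import List
--
-- def isTrionic(nums: List[int]) -> bool:
--     n = len(nums)
--
--     if nums[1] <= nums[0]:
--         return False
--
--     # finding p
--     p = 1
--     while p < n:
--         if nums[p] == nums[p - 1]:
--             return False
--
--         if nums[p] < nums[p - 1]:
--             break
--
--         p += 1
--
--     if p == n:
--         return False
--
--     # finding q
--     q = p
--     while q < n:
--         if nums[q] == nums[q - 1]:
--             return False
--
--         if nums[q] > nums[q - 1]: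
--             break
--         q += 1
--
--     if q == n:
--         return False
--
--     while q < n:
--         if nums[q] <= nums[q - 1]:
--             return False
--         q += 1
--
--     return True
-- ===== SOURCE B (Python) =====
-- from typing import List
--
-- def isTrionic(nums: List[int]) -> bool:
--     # run-length-encode the signs of consecutive differences; trionic <=> runs == [+, -, +]
--     runs = []
--     for prev, cur in zip(nums, nums[1:]):
--         if cur == prev:
--             return False
--         s = 1 if cur > prev else -1
--         if not runs or runs[-1] != s:
--             runs.append(s)
--     return runs == [1, -1, 1]
-- ===== Notes on version B (the rewrite author's own statement) =====
-- stated objective: simpler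
-- what changed: Replaces A's three sequential index-driven while-loops (find peak, find valley, verify tail) with a single pass over adjacent pairs that run-length-encodes the difference signs and checks the runs equal [+,-,+].
-- outside the precondition, e.g. on isTrionic([1]): A raises IndexError, B returns False
import Mathlib
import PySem

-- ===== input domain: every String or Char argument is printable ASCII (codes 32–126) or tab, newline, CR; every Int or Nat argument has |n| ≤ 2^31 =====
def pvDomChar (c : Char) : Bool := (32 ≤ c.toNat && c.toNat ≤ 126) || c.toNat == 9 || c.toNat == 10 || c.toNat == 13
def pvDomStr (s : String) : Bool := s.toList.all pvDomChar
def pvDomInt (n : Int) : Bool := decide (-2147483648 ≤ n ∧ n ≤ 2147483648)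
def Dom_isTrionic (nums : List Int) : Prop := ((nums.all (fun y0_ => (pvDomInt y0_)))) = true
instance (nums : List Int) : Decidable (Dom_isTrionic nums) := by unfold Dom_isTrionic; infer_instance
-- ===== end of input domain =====

-- B replaces A's three sequential while-loops by one pass that run-length-encodes the signs of
-- consecutive differences and checks the runs equal [+,-,+] (objective: simpler; same O(n) cost).


-- ===== PORT A =====
-- indices are in range whenever the loops run (guarded by p < n / Pre_), so xs[i] is pyGetD
-- fuel = number of remaining iterations (n - p); the loop also stops itself at p = n
def isTrionicLoop1 (nums : List Int) (n : Int) (p : Int) : Nat → Option Int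
  | 0 => some p
  | fuel + 1 =>
    if p < n then
      if PySem.List.pyGetD nums p 0 = PySem.List.pyGetD nums (p - 1) 0 then none
      else if PySem.List.pyGetD nums p 0 < PySem.List.pyGetD nums (p - 1) 0 then some p
      else isTrionicLoop1 nums n (p + 1) fuel
    else some p

def isTrionicLoop2 (nums : List Int) (n : Int) (q : Int) : Nat → Option Int
  | 0 => some q
  | fuel + 1 =>
    if q < n then
      if PySem.List.pyGetD nums q 0 = PySem.List.pyGetD nums (q - 1) 0 then none
      else if PySem.List.pyGetD nums q 0 > PySem.List.pyGetD nums (q - 1) 0 then some q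
      else isTrionicLoop2 nums n (q + 1) fuel
    else some q

def isTrionicLoop3 (nums : List Int) (n : Int) (q : Int) : Nat → Bool
  | 0 => true
  | fuel + 1 =>
    if q < n then
      if PySem.List.pyGetD nums q 0 ≤ PySem.List.pyGetD nums (q - 1) 0 then false
      else isTrionicLoop3 nums n (q + 1) fuel
    else true

def isTrionic (nums : List Int) : Bool :=
  let n : Int := nums.length
  if PySem.List.pyGetD nums 1 0 ≤ PySem.List.pyGetD nums 0 0 then false
  else
    match isTrionicLoop1 nums n 1 (n - 1).toNat with
    | none => false
    | some p =>
      if p = n then false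
      else
        match isTrionicLoop2 nums n p (n - p).toNat with
        | none => false
        | some q =>
          if q = n then false
          else isTrionicLoop3 nums n q (n - q).toNat

-- ===== PORT B =====
def isTrionicAltLoop (pairs : List (Int × Int)) (runs : List Int) : Option (List Int) :=
  match pairs with
  | [] => some runs
  | (prev, cur) :: rest =>
    if cur = prev then none
    else
      let s : Int := if cur > prev then 1 else -1
      let runs' := if runs = [] ∨ PySem.List.pyGet? runs (-1) ≠ some s then runs ++ [s] else runs
      isTrionicAltLoop rest runs'

-- zip(nums, nums[1:]) = nums.zip nums.tail (PySem.List.slice_from_one: xs[1:] = xs.tail)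
def isTrionic_alt (nums : List Int) : Bool :=
  match isTrionicAltLoop (nums.zip nums.tail) [] with
  | none => false
  | some runs => runs == [1, -1, 1]

-- ===== PRECONDITION & SPEC =====
-- A reads nums[1] eagerly and raises IndexError on lists of length < 2; exactly those are excluded.
def Pre_isTrionic (nums : List Int) : Prop := 2 ≤ nums.length
instance (nums : List Int) : Decidable (Pre_isTrionic nums) := by unfold Pre_isTrionic; infer_instance
def pvWitness_isTrionic : List Int := [1, 3, 2, 4]

def Spec_isTrionic (nums : List Int) (out : Bool) : Prop := out = isTrionic_alt nums
instance (nums : List Int) (out : Bool) : Decidable (Spec_isTrionic nums out) := by unfold Spec_isTrionic; infer_instance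

-- ===== CLAIM (what is proved, stated in full; the proofs are below) =====
def Claim_equal_isTrionic : Prop := ∀ (nums : List Int), Dom_isTrionic nums → Pre_isTrionic nums → Spec_isTrionic nums (isTrionic nums)

-- ===== LEMMAS AND PROOFS =====

-- phase functions: the common shape of both programs on the tail of the list
def ph3 : Int → List Int → Bool
  | _, [] => true
  | prev, x :: xs => if x ≤ prev then false else ph3 x xs

def ph2 : Int → List Int → Bool
  | _, [] => false
  | prev, x :: xs => if x = prev then false else if x > prev then ph3 x xs else ph2 x xs

def ph1 : Int → List Int → Bool
  | _, [] => false
  | prev, x :: xs => if x = prev then false else if x < prev then ph2 x xs else ph1 x xs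

def phTop : List Int → Bool
  | a :: b :: rest => if b ≤ a then false else ph1 b rest
  | _ => false

-- consecutive pairs of prev :: l
def cpairs : Int → List Int → List (Int × Int)
  | _, [] => []
  | prev, x :: xs => (prev, x) :: cpairs x xs

theorem zip_tail_eq_cpairs (a : Int) (l : List Int) :
    (a :: l).zip l = cpairs a l := by
  induction l generalizing a with
  | nil => rfl
  | cons x xs ih => simp only [List.zip_cons_cons, cpairs, ih x]

def finishRuns (o : Option (List Int)) : Bool :=
  match o with
  | none => false
  | some runs => runs == [1, -1, 1]

theorem altLoop_step (prev cur : Int) (rest : List (Int × Int)) (runs : List Int)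
    (h : ¬ cur = prev) :
    isTrionicAltLoop ((prev, cur) :: rest) runs =
      isTrionicAltLoop rest
        (if runs = [] ∨ PySem.List.pyGet? runs (-1) ≠ some (if cur > prev then 1 else -1)
         then runs ++ [if cur > prev then 1 else -1] else runs) := by
  simp only [isTrionicAltLoop, if_neg h]

theorem altLoop_prefix (pairs : List (Int × Int)) (runs r : List Int)
    (h : isTrionicAltLoop pairs runs = some r) : runs <+: r := by
  induction pairs generalizing runs with
  | nil =>
    simp only [isTrionicAltLoop, Option.some.injEq] at h
    simp [h]
  | cons p rest ih =>
    obtain ⟨prev, cur⟩ := p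
    by_cases hc : cur = prev
    · simp [isTrionicAltLoop, hc] at h
    · rw [altLoop_step prev cur rest runs hc] at h
      by_cases hb : runs = [] ∨ PySem.List.pyGet? runs (-1) ≠ some (if cur > prev then 1 else -1)
      · rw [if_pos hb] at h
        exact (List.prefix_append runs _).trans (ih _ h)
      · rw [if_neg hb] at h
        exact ih _ h

theorem doom (pairs : List (Int × Int)) (runs : List Int) (h : 4 ≤ runs.length) :
    finishRuns (isTrionicAltLoop pairs runs) = false := by
  cases hE : isTrionicAltLoop pairs runs with
  | none => simp [finishRuns]
  | some r =>
    have hpre := altLoop_prefix pairs runs r hE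
    have hlen : runs.length ≤ r.length := hpre.length_le
    have hr : r ≠ [1, -1, 1] := by
      intro hq; subst hq; simp at hlen; omega
    simp [finishRuns, hr]

theorem M3 (l : List Int) (prev : Int) :
    finishRuns (isTrionicAltLoop (cpairs prev l) [1, -1, 1]) = ph3 prev l := by
  induction l generalizing prev with
  | nil => rfl
  | cons x xs ih =>
    simp only [cpairs, ph3]
    by_cases he : x = prev
    · simp [isTrionicAltLoop, he, finishRuns]
    · rw [altLoop_step prev x _ _ he]
      by_cases hgt : x > prev
      · have hnle : ¬ x ≤ prev := by omega
        rw [if_pos hgt, if_neg hnle, if_neg (by decide)]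
        exact ih x
      · have hle : x ≤ prev := by omega
        rw [if_neg hgt, if_pos hle, if_pos (by decide)]
        exact doom _ _ (by simp)

theorem M2 (l : List Int) (prev : Int) :
    finishRuns (isTrionicAltLoop (cpairs prev l) [1, -1]) = ph2 prev l := by
  induction l generalizing prev with
  | nil => rfl
  | cons x xs ih =>
    simp only [cpairs, ph2]
    by_cases he : x = prev
    · simp [isTrionicAltLoop, he, finishRuns]
    · rw [altLoop_step prev x _ _ he, if_neg he]
      by_cases hgt : x > prev
      · rw [if_pos hgt, if_pos hgt, if_pos (by decide)]
        exact M3 xs x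
      · rw [if_neg hgt, if_neg hgt, if_neg (by decide)]
        exact ih x

theorem M1 (l : List Int) (prev : Int) :
    finishRuns (isTrionicAltLoop (cpairs prev l) [1]) = ph1 prev l := by
  induction l generalizing prev with
  | nil => rfl
  | cons x xs ih =>
    simp only [cpairs, ph1]
    by_cases he : x = prev
    · simp [isTrionicAltLoop, he, finishRuns]
    · rw [altLoop_step prev x _ _ he, if_neg he]
      by_cases hgt : x > prev
      · have hnlt : ¬ x < prev := by omega
        rw [if_pos hgt, if_neg hnlt, if_neg (by decide)]
        exact ih x
      · have hlt : x < prev := by omega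
        rw [if_neg hgt, if_pos hlt, if_pos (by decide)]
        exact M2 xs x

theorem alt_eq_phTop (nums : List Int) (h : 2 ≤ nums.length) :
    isTrionic_alt nums = phTop nums := by
  match nums with
  | a :: b :: rest =>
    simp only [isTrionic_alt, phTop]
    rw [List.tail_cons, zip_tail_eq_cpairs]
    show finishRuns (isTrionicAltLoop (cpairs a (b :: rest)) []) = _
    simp only [cpairs]
    by_cases he : b = a
    · simp [isTrionicAltLoop, he, finishRuns]
    · rw [altLoop_step a b _ _ he]
      by_cases hgt : b > a
      · have hnle : ¬ b ≤ a := by omega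
        rw [if_pos hgt, if_neg hnle, if_pos (by decide)]
        show finishRuns (isTrionicAltLoop (cpairs b rest) [1]) = _
        exact M1 rest b
      · have hle : b ≤ a := by omega
        rw [if_neg hgt, if_pos hle, if_pos (by decide)]
        show finishRuns (isTrionicAltLoop (cpairs b rest) [-1]) = _
        cases hE : isTrionicAltLoop (cpairs b rest) [-1] with
        | none => simp [finishRuns]
        | some r =>
          have hpre := altLoop_prefix _ _ _ hE
          have hr : r ≠ [1, -1, 1] := by
            intro hq; subst hq
            rcases hpre with ⟨t, ht⟩
            cases ht
          simp [finishRuns, hr]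

-- A-side: getD facts
theorem pyGetD_int (nums : List Int) (i : Int) (h0 : 0 ≤ i) (_h1 : i < nums.length) :
    PySem.List.pyGetD nums i 0 = nums.getD i.toNat 0 := by
  have h2 : ((i.toNat : Nat) : Int) = i := by omega
  calc PySem.List.pyGetD nums i 0 = PySem.List.pyGetD nums ((i.toNat : Nat) : Int) 0 := by rw [h2]
    _ = nums.getD i.toNat 0 := PySem.List.pyGetD_natCast nums i.toNat 0

theorem drop_pyGetD_cons (nums : List Int) (q : Int) (h0 : 0 ≤ q) (h1 : q < nums.length) :
    nums.drop q.toNat = PySem.List.pyGetD nums q 0 :: nums.drop (q + 1).toNat := by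
  have h2 : (q + 1).toNat = q.toNat + 1 := by omega
  rw [h2, pyGetD_int nums q h0 h1, List.getD_eq_getElem nums 0 (by omega)]
  exact List.drop_eq_getElem_cons (by omega)

theorem L3 (nums : List Int) (fuel : Nat) :
    ∀ q : Int, 1 ≤ q → q + fuel = nums.length →
    isTrionicLoop3 nums nums.length q fuel = ph3 (PySem.List.pyGetD nums (q - 1) 0) (nums.drop q.toNat) := by
  induction fuel with
  | zero =>
    intro q h1 h2
    have : q = (nums.length : Int) := by omega
    simp [isTrionicLoop3, this, ph3]
  | succ fuel ih =>
    intro q h1 h2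
    have hq : q < (nums.length : Int) := by omega
    have hstep := ih (q + 1) (by omega) (by omega)
    rw [show q + 1 - 1 = q from by ring] at hstep
    rw [drop_pyGetD_cons nums q (by omega) hq]
    simp only [isTrionicLoop3, if_pos hq, ph3]
    split_ifs with hle
    · rfl
    · exact hstep

theorem L2 (nums : List Int) (fuel : Nat) :
    ∀ q : Int, 1 ≤ q → q + fuel = nums.length →
    (match isTrionicLoop2 nums nums.length q fuel with
     | none => false
     | some q' => if q' = (nums.length : Int) then false
                  else isTrionicLoop3 nums nums.length q' ((nums.length : Int) - q').toNat)
    = ph2 (PySem.List.pyGetD nums (q - 1) 0) (nums.drop q.toNat) := by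
  induction fuel with
  | zero =>
    intro q h1 h2
    have hq : q = (nums.length : Int) := by omega
    simp [isTrionicLoop2, hq, ph2]
  | succ fuel ih =>
    intro q h1 h2
    have hq : q < (nums.length : Int) := by omega
    have hstep := ih (q + 1) (by omega) (by omega)
    rw [show q + 1 - 1 = q from by ring] at hstep
    have hL3 := L3 nums ((nums.length : Int) - (q + 1)).toNat (q + 1) (by omega) (by omega)
    rw [show q + 1 - 1 = q from by ring] at hL3
    rw [drop_pyGetD_cons nums q (by omega) hq]
    simp only [isTrionicLoop2, if_pos hq, ph2]
    by_cases he : PySem.List.pyGetD nums q 0 = PySem.List.pyGetD nums (q - 1) 0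
    · simp [he]
    · rw [if_neg he, if_neg he]
      by_cases hgt : PySem.List.pyGetD nums q 0 > PySem.List.pyGetD nums (q - 1) 0
      · rw [if_pos hgt, if_pos hgt]
        have hne : q ≠ (nums.length : Int) := by omega
        show (if q = ((nums.length : Int)) then false
              else isTrionicLoop3 nums nums.length q ((nums.length : Int) - q).toNat) = _
        rw [if_neg hne]
        rw [show ((nums.length : Int) - q).toNat = ((nums.length : Int) - (q + 1)).toNat + 1 from by omega]
        simp only [isTrionicLoop3, if_pos hq]
        rw [if_neg (by omega)]
        exact hL3
      · rw [if_neg hgt, if_neg hgt]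
        exact hstep

theorem L1 (nums : List Int) (fuel : Nat) :
    ∀ p : Int, 1 ≤ p → p + fuel = nums.length →
    (match isTrionicLoop1 nums nums.length p fuel with
     | none => false
     | some p' =>
       if p' = (nums.length : Int) then false
       else
         match isTrionicLoop2 nums nums.length p' ((nums.length : Int) - p').toNat with
         | none => false
         | some q' => if q' = (nums.length : Int) then false
                      else isTrionicLoop3 nums nums.length q' ((nums.length : Int) - q').toNat)
    = ph1 (PySem.List.pyGetD nums (p - 1) 0) (nums.drop p.toNat) := by
  induction fuel with
  | zero =>
    intro p h1 h2
    have hp : p = (nums.length : Int) := by omega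
    simp [isTrionicLoop1, hp, ph1]
  | succ fuel ih =>
    intro p h1 h2
    have hp : p < (nums.length : Int) := by omega
    have hstep := ih (p + 1) (by omega) (by omega)
    rw [show p + 1 - 1 = p from by ring] at hstep
    have hL2 := L2 nums ((nums.length : Int) - p).toNat p (by omega) (by omega)
    rw [drop_pyGetD_cons nums p (by omega) hp] at hL2
    rw [drop_pyGetD_cons nums p (by omega) hp]
    simp only [isTrionicLoop1, if_pos hp, ph1]
    by_cases he : PySem.List.pyGetD nums p 0 = PySem.List.pyGetD nums (p - 1) 0
    · simp [he]
    · rw [if_neg he, if_neg he]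
      by_cases hlt : PySem.List.pyGetD nums p 0 < PySem.List.pyGetD nums (p - 1) 0
      · rw [if_pos hlt, if_pos hlt]
        have hne : p ≠ (nums.length : Int) := by omega
        show (if p = ((nums.length : Int)) then false
              else match isTrionicLoop2 nums nums.length p ((nums.length : Int) - p).toNat with
                   | none => false
                   | some q' => if q' = ((nums.length : Int)) then false
                                else isTrionicLoop3 nums nums.length q' ((nums.length : Int) - q').toNat) = _
        rw [if_neg hne, hL2]
        simp only [ph2]
        rw [if_neg he, if_neg (by omega)]
      · rw [if_neg hlt, if_neg hlt]
        exact hstep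

theorem a_eq_phTop (nums : List Int) (h : 2 ≤ nums.length) :
    isTrionic nums = phTop nums := by
  match nums, h with
  | a :: b :: rest, _ =>
    simp only [isTrionic, phTop]
    have h0 : PySem.List.pyGetD (a :: b :: rest) 0 0 = a := by
      simp [PySem.List.pyGetD_zero_cons]
    have h1 : PySem.List.pyGetD (a :: b :: rest) 1 0 = b := by
      rw [pyGetD_int (a :: b :: rest) 1 (by omega) (by omega)]
      rfl
    rw [h0, h1]
    by_cases hle : b ≤ a
    · simp [hle]
    · simp only [if_neg hle]
      have hlen : (1 : Int) + ((((a :: b :: rest).length : Int)) - 1).toNat = ((a :: b :: rest).length : Int) := by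
        simp; omega
      rw [L1 (a :: b :: rest) ((((a :: b :: rest).length : Int)) - 1).toNat 1 (by omega) hlen]
      have hg : PySem.List.pyGetD (a :: b :: rest) (1 - 1) 0 = a := by
        norm_num [PySem.List.pyGetD_zero_cons]
      rw [hg, show (1 : Int).toNat = 1 from rfl]
      show ph1 a ((a :: b :: rest).drop 1) = ph1 b rest
      have hne : ¬ b = a := by omega
      have hnlt : ¬ b < a := by omega
      simp only [List.drop_one, List.tail_cons, ph1]
      simp [hne, hnlt]

-- ===== VERDICT (by name: the statement is the Claim_ definition above) =====
theorem isTrionic_spec : Claim_equal_isTrionic := by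
  intro nums _ hpre
  unfold Spec_isTrionic
  rw [a_eq_phTop nums hpre, alt_eq_phTop nums hpre]
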